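-- pv_equiv track=rewrite | github.com/sultandaniels/TFs_do_KF_ICL | identity_data/prepare_data.py | try_fit_template
-- ===== SOURCE A (Python) =====
-- def try_fit_template(string, template):
--     pieces_s, pieces_t = string.strip(), template.strip()
--
--     mapping = {}
--
--     for s, t in zip(pieces_s.split(), pieces_t.split()):
--         if s == t:
--             continue
--         if s[-1] == t[-1] and s[-1] in [',', '.']:
--             s, t = s[:-1], t[:-1]
--         if t not in ['{A}', '{B}', '{PLACE}', '{OBJECT}']:
--             return None
--         elif t[1:-1].lower() in mapping:
--             if mapping[t[1:-1].lower()] != s: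
--                 return None
--         else:
--             mapping[t[1:-1].lower()] = s
--
--     if 'place' not in mapping:
--         mapping['place'] = None
--     if 'object' not in mapping:
--         mapping['object'] = None
--
--     return mapping
-- ===== SOURCE B (Python) =====
-- PLACEHOLDER_KEY = {'{A}': 'a', '{B}': 'b', '{PLACE}': 'place', '{OBJECT}': 'object'}
--
--
-- def try_fit_template(string, template):
--     # Staged pipeline instead of A's early-return pass with a growing dict.
--     # Stage 1: normalized mismatching (word, template-word) pairs.
--     def norm(s, t):
--         if s[-1] == t[-1] and s[-1] in ',.':
--             return s[:-1], t[:-1]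
--         return s, t
--     pairs = [norm(s, t) for s, t in zip(string.strip().split(), template.strip().split()) if s != t]
--     # Stage 2: every mismatching template word must be a placeholder.
--     if any(t not in PLACEHOLDER_KEY for _, t in pairs):
--         return None
--     # Stage 3: placeholder keys in first-occurrence order.
--     keys = []
--     for _, t in pairs:
--         k = PLACEHOLDER_KEY[t]
--         if k not in keys:
--             keys.append(k)
--     # Stage 4: each key must be bound to exactly one distinct value.
--     mapping = {}
--     for k in keys:
--         vals = []
--         for s, t in pairs:
--             if PLACEHOLDER_KEY[t] == k and s not in vals:
--                 vals.append(s)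
--         if len(vals) != 1:
--             return None
--         mapping[k] = vals[0]
--     for k in ('place', 'object'):
--         if k not in mapping:
--             mapping[k] = None
--     return mapping
-- ===== Notes on version B (the rewrite author's own statement) =====
-- stated objective: alternative
-- what changed: A is a single early-return pass that grows a key->value dict with inline conflict checks; B is a staged pipeline: build the normalized mismatching-pair list once, check validity of all template words globally, compute the first-occurrence key order, then for each key scan the pair list for its distinct values (via a module-level placeholder->key table) and assemble the mapping.
import Mathlib
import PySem

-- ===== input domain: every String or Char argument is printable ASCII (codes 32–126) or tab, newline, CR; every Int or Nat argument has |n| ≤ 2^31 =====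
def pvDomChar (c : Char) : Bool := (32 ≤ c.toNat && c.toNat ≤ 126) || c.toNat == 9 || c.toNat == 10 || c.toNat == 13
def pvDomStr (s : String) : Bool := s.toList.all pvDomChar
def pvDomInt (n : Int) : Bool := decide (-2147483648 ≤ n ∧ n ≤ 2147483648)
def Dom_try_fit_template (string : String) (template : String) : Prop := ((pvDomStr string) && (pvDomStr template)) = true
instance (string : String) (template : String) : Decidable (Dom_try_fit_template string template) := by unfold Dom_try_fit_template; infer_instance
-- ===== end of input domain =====

-- B replaces A's early-return single pass over a growing dict by a staged pipeline:
-- normalized pair list, then a global validity check, then first-occurrence key order,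
-- then a per-key distinct-value scan (table-driven key lookup) (objective: alternative).


-- ===== PORT A =====
-- shared tokenisation: zip(string.strip().split(), template.strip().split())
def pvTokens (string : String) (template : String) : List (String × String) :=
  List.zip (PySem.Str.split₀ (PySem.Str.strip string)) (PySem.Str.split₀ (PySem.Str.strip template))

-- the trailing-','/'.' strip both Pythons perform verbatim; s[-1]/t[-1] via pyGet?
-- (exact: split() tokens are nonempty, so Python's s[-1] never raises; on an
--  empty token pyGet? is none and the guard is simply false)
def pvStripPair (s t : String) : String × String :=
  if PySem.Str.pyGet? s (-1) = PySem.Str.pyGet? t (-1) ∧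
     (PySem.Str.pyGet? s (-1) = some ',' ∨ PySem.Str.pyGet? s (-1) = some '.') then
    (PySem.Str.slice s none (some (-1)), PySem.Str.slice t none (some (-1)))
  else (s, t)

def pvKey (t : String) : String := PySem.Str.lower (PySem.Str.slice t (some 1) (some (-1)))

-- A's loop: early return None, mapping key -> value (values always 'some _' during the loop)
def pvALoop : List (String × String) → PySem.Dict String (Option String) →
    Option (PySem.Dict String (Option String))
  | [], m => some m
  | (s, t) :: rest, m =>
    if s = t then pvALoop rest m
    else
      if (pvStripPair s t).2 ∈ (["{A}", "{B}", "{PLACE}", "{OBJECT}"] : List String) then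
        match m.get? (pvKey (pvStripPair s t).2) with
        | some v => if v ≠ some (pvStripPair s t).1 then none else pvALoop rest m
        | none => pvALoop rest (m.insert (pvKey (pvStripPair s t).2) (some (pvStripPair s t).1))
      else none

def try_fit_template (string : String) (template : String) : Option (List (String × Option String)) :=
  match pvALoop (pvTokens string template) PySem.Dict.empty with
  | none => none
  | some m =>
    let m1 := if m.contains "place" then m else m.insert "place" none
    let m2 := if m1.contains "object" then m1 else m1.insert "object" none
    some m2.items

-- ===== PORT B =====
-- the module-level PLACEHOLDER_KEY table
def pvPH : PySem.Dict String String :=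
  PySem.Dict.mk [("{A}", "a"), ("{B}", "b"), ("{PLACE}", "place"), ("{OBJECT}", "object")]

-- Stage 1: the comprehension [norm(s, t) for s, t in zip(...) if s != t]
def pvPairs (string : String) (template : String) : List (String × String) :=
  ((pvTokens string template).filter (fun p => p.1 ≠ p.2)).map (fun p => pvStripPair p.1 p.2)

-- Stage 3 loop: placeholder keys in first-occurrence order
def pvKeysOf : List (String × String) → List String → List String
  | [], ks => ks
  | p :: rest, ks =>
    pvKeysOf rest (if pvPH.getD p.2 "" ∈ ks then ks else ks ++ [pvPH.getD p.2 ""])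

-- Stage 4 inner loop: distinct values bound to key k, first-seen order
def pvValsFor (pairs : List (String × String)) (k : String) : List String :=
  pairs.foldl (fun vs p => if pvPH.getD p.2 "" = k ∧ p.1 ∉ vs then vs ++ [p.1] else vs) []

-- Stage 4 outer loop: mapping[k] = vals[0] (wrapped 'some' per the Option-valued dict; with
-- len(vals) = 1 that head? is exactly 'some vals[0]'), or fail when len(vals) != 1
def pvBuildB (pairs : List (String × String)) :
    List String → PySem.Dict String (Option String) → Option (PySem.Dict String (Option String))
  | [], m => some m
  | k :: ks, m =>
    if (pvValsFor pairs k).length ≠ 1 then none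
    else pvBuildB pairs ks (m.insert k (pvValsFor pairs k).head?)

def try_fit_template_alt (string : String) (template : String) : Option (List (String × Option String)) :=
  let pairs := pvPairs string template
  if pairs.any (fun p => !pvPH.contains p.2) then none
  else
    match pvBuildB pairs (pvKeysOf pairs []) PySem.Dict.empty with
    | none => none
    | some m =>
      some ((["place", "object"] : List String).foldl
        (fun m k => if m.contains k then m else m.insert k none) m).items

-- ===== PRECONDITION & SPEC =====
def Spec_try_fit_template (string : String) (template : String) (out : Option (List (String × Option String))) : Prop := out = try_fit_template_alt string template
instance (string : String) (template : String) (out : Option (List (String × Option String))) : Decidable (Spec_try_fit_template string template out) := by unfold Spec_try_fit_template; infer_instance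

-- ===== CLAIM (what is proved, stated in full; the proofs are below) =====
def Claim_equal_try_fit_template : Prop := ∀ (string : String) (template : String), Dom_try_fit_template string template → Spec_try_fit_template string template (try_fit_template string template)

-- ===== LEMMAS AND PROOFS =====

-- A's loop rephrased over the normalized mismatching pairs (B's Stage-1 list)
def pvALoop' : List (String × String) → PySem.Dict String (Option String) →
    Option (PySem.Dict String (Option String))
  | [], m => some m
  | p :: rest, m =>
    if p.2 ∈ (["{A}", "{B}", "{PLACE}", "{OBJECT}"] : List String) then
      match m.get? (pvKey p.2) with
      | some v => if v ≠ some p.1 then none else pvALoop' rest m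
      | none => pvALoop' rest (m.insert (pvKey p.2) (some p.1))
    else none

theorem pvALoop_eq_ALoop' (ts : List (String × String)) (m : PySem.Dict String (Option String)) :
    pvALoop ts m = pvALoop' ((ts.filter (fun p => p.1 ≠ p.2)).map (fun p => pvStripPair p.1 p.2)) m := by
  induction ts generalizing m with
  | nil => rfl
  | cons p rest ih =>
    obtain ⟨s, t⟩ := p
    by_cases h : s = t
    · simp [pvALoop, h, ih]
    · have hf : decide ((s, t).1 ≠ (s, t).2) = true := by simpa using h
      rw [List.filter_cons, if_pos hf, List.map_cons]
      by_cases hmem : (pvStripPair s t).2 ∈ (["{A}", "{B}", "{PLACE}", "{OBJECT}"] : List String)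
      · simp only [pvALoop, if_neg h, pvALoop', if_pos hmem]
        cases m.get? (pvKey (pvStripPair s t).2) with
        | none => exact ih _
        | some v =>
          by_cases hv : v ≠ some (pvStripPair s t).1
          · simp [hv]
          · simp [hv, ih]
      · simp [pvALoop, if_neg h, pvALoop', hmem]

-- bridge: the table pvPH vs A's literal list and key expression
theorem pvPH_contains_iff (t : String) :
    pvPH.contains t = true ↔ t ∈ (["{A}", "{B}", "{PLACE}", "{OBJECT}"] : List String) := by
  simp [pvPH, PySem.Dict.contains_mk, List.mem_cons]
  constructor
  · rintro (h | h | h | h) <;> subst h <;> simp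
  · rintro (h | h | h | h) <;> subst h <;> simp

theorem pvPH_getD_eq_pvKey (t : String)
    (h : t ∈ (["{A}", "{B}", "{PLACE}", "{OBJECT}"] : List String)) :
    pvPH.getD t "" = pvKey t := by
  simp only [List.mem_cons, List.not_mem_nil, or_false] at h
  rcases h with rfl | rfl | rfl | rfl <;> decide

-- key order, proof-shaped: skip keys already seen, emit new ones
def pvKeysG : List (String × String) → List String → List String
  | [], _ => []
  | p :: rest, seen =>
    if pvPH.getD p.2 "" ∈ seen then pvKeysG rest seen
    else pvPH.getD p.2 "" :: pvKeysG rest (seen ++ [pvPH.getD p.2 ""])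

theorem pvKeysOf_eq (pairs : List (String × String)) (ks : List String) :
    pvKeysOf pairs ks = ks ++ pvKeysG pairs ks := by
  induction pairs generalizing ks with
  | nil => simp [pvKeysOf, pvKeysG]
  | cons p rest ih =>
    simp only [pvKeysOf, pvKeysG]
    split_ifs with h
    · simp [ih, h]
    · simp [ih, h]

theorem pvKeysG_not_mem_seen (pairs : List (String × String)) (seen : List String)
    (k : String) (hk : k ∈ pvKeysG pairs seen) : k ∉ seen := by
  induction pairs generalizing seen with
  | nil => simp [pvKeysG] at hk
  | cons p rest ih =>
    simp only [pvKeysG] at hk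
    split_ifs at hk with h
    · exact ih seen hk
    · rcases List.mem_cons.mp hk with rfl | hk
      · exact h
      · intro hs; exact ih _ hk (List.mem_append_left _ hs)

-- membership in the collected distinct-value list
theorem pvValsFor_mem_aux (pairs : List (String × String)) (k : String) (vs : List String) (x : String) :
    x ∈ pairs.foldl (fun vs p => if pvPH.getD p.2 "" = k ∧ p.1 ∉ vs then vs ++ [p.1] else vs) vs ↔
      x ∈ vs ∨ ∃ p ∈ pairs, pvPH.getD p.2 "" = k ∧ p.1 = x := by
  induction pairs generalizing vs with
  | nil => simp
  | cons p rest ih =>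
    simp only [List.foldl_cons, ih]
    constructor
    · rintro (h | ⟨q, hq, h1, h2⟩)
      · split_ifs at h with hc
        · rcases List.mem_append.mp h with h | h
          · exact Or.inl h
          · exact Or.inr ⟨p, List.mem_cons_self .., hc.1, (List.mem_singleton.mp h).symm⟩
        · exact Or.inl h
      · exact Or.inr ⟨q, List.mem_cons_of_mem _ hq, h1, h2⟩
    · rintro (h | ⟨q, hq, h1, h2⟩)
      · left; split_ifs <;> simp [h]
      · rcases List.mem_cons.mp hq with rfl | hq
        · by_cases hin : q.1 ∈ vs
          · left; split_ifs <;> simp [h2 ▸ hin]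
          · left; rw [if_pos ⟨h1, hin⟩]; simp [h2]
        · exact Or.inr ⟨q, hq, h1, h2⟩

theorem pvValsFor_mem (pairs : List (String × String)) (k : String) (x : String) :
    x ∈ pvValsFor pairs k ↔ ∃ p ∈ pairs, pvPH.getD p.2 "" = k ∧ p.1 = x := by
  simpa using pvValsFor_mem_aux pairs k [] x

theorem pvValsFor_cons_ne (p : String × String) (pairs : List (String × String)) (k : String)
    (h : pvPH.getD p.2 "" ≠ k) : pvValsFor (p :: pairs) k = pvValsFor pairs k := by
  simp [pvValsFor, List.foldl_cons, h]

theorem pvValsFor_stable (pairs : List (String × String)) (k : String) (vs : List String)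
    (h : ∀ p ∈ pairs, pvPH.getD p.2 "" = k → p.1 ∈ vs) :
    pairs.foldl (fun vs p => if pvPH.getD p.2 "" = k ∧ p.1 ∉ vs then vs ++ [p.1] else vs) vs = vs := by
  induction pairs with
  | nil => rfl
  | cons p rest ih =>
    rw [List.foldl_cons, if_neg, ih]
    · intro q hq h1; exact h q (List.mem_cons_of_mem _ hq) h1
    · rintro ⟨h1, h2⟩; exact h2 (h p (List.mem_cons_self ..) h1)

theorem pvBuildB_congr (P Q : List (String × String)) (ks : List String)
    (h : ∀ k ∈ ks, pvValsFor P k = pvValsFor Q k) :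
    ∀ m, pvBuildB P ks m = pvBuildB Q ks m := by
  induction ks with
  | nil => intro m; rfl
  | cons k ks ih =>
    intro m
    have hk := h k (List.mem_cons_self ..)
    simp only [pvBuildB, hk]
    split_ifs
    · rfl
    · exact ih (fun k' hk' => h k' (List.mem_cons_of_mem _ hk')) _

theorem pvBuildB_none (P : List (String × String)) (ks : List String)
    (k : String) (hk : k ∈ ks) (h : (pvValsFor P k).length ≠ 1) :
    ∀ m, pvBuildB P ks m = none := by
  induction ks with
  | nil => exact absurd hk (List.not_mem_nil)
  | cons k' ks ih =>
    intro m
    rcases List.mem_cons.mp hk with rfl | hk'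
    · simp [pvBuildB, h]
    · simp only [pvBuildB]
      split_ifs
      · rfl
      · exact ih hk' _

theorem pv_two_le_length {l : List String} {a b : String} (ha : a ∈ l) (hb : b ∈ l)
    (hab : a ≠ b) : 2 ≤ l.length := by
  match l with
  | [] => exact absurd ha (List.not_mem_nil)
  | [x] =>
    rw [List.mem_singleton] at ha hb
    exact absurd (ha.trans hb.symm) hab
  | _ :: _ :: _ => simp

-- B's staged computation with an ambient already-committed mapping m
def pvStagedG (pairs : List (String × String)) (m : PySem.Dict String (Option String)) :
    Option (PySem.Dict String (Option String)) :=
  if pairs.any (fun p => !pvPH.contains p.2) then none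
  else if pairs.any (fun p => match m.get? (pvPH.getD p.2 "") with
      | some v => decide (v ≠ some p.1) | none => false) then none
  else pvBuildB pairs (pvKeysG pairs m.keys) m

theorem pvStagedG_invalid (pairs : List (String × String)) (m : PySem.Dict String (Option String))
    (h : pairs.any (fun p => !pvPH.contains p.2) = true) : pvStagedG pairs m = none := by
  unfold pvStagedG
  rw [if_pos h]

-- step: invalid head token
theorem pvStagedG_cons_invalid (p : String × String) (rest : List (String × String))
    (m : PySem.Dict String (Option String)) (h : pvPH.contains p.2 = false) :
    pvStagedG (p :: rest) m = none := by
  apply pvStagedG_invalid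
  rw [List.any_cons, h]
  rfl

-- step: head token already consistently bound (in m, value agrees)
theorem pvStagedG_cons_seen (p : String × String) (rest : List (String × String))
    (m : PySem.Dict String (Option String)) (hc : pvPH.contains p.2 = true)
    (hg : m.get? (pvPH.getD p.2 "") = some (some p.1)) :
    pvStagedG (p :: rest) m = pvStagedG rest m := by
  have hkm : pvPH.getD p.2 "" ∈ m.keys :=
    PySem.Dict.mem_keys_of_mem_items _ (PySem.Dict.mem_items_of_get?_eq_some m hg)
  unfold pvStagedG
  rw [List.any_cons, List.any_cons, hc]
  simp only [Bool.not_true, Bool.false_or]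
  rw [hg]
  simp only [ne_eq, not_true_eq_false, decide_false, Bool.false_or]
  have hkeys : pvKeysG (p :: rest) m.keys = pvKeysG rest m.keys := by
    simp [pvKeysG, hkm]
  rw [hkeys]
  split_ifs with h1 h2
  · rfl
  · rfl
  · exact pvBuildB_congr _ _ _ (fun k hk => pvValsFor_cons_ne _ _ _
      (fun he => pvKeysG_not_mem_seen rest m.keys k hk (he ▸ hkm))) m

-- step: head token bound in m to a DIFFERENT value
theorem pvStagedG_cons_conflict (p : String × String) (rest : List (String × String))
    (m : PySem.Dict String (Option String)) (hc : pvPH.contains p.2 = true)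
    (v : Option String) (hg : m.get? (pvPH.getD p.2 "") = some v) (hne : v ≠ some p.1) :
    pvStagedG (p :: rest) m = none := by
  unfold pvStagedG
  split_ifs with h1 h2
  · rfl
  · rfl
  · exfalso
    apply h2
    rw [List.any_cons]
    have : (match m.get? (pvPH.getD p.2 "") with
        | some v => decide (v ≠ some p.1) | none => false) = true := by
      rw [hg]; simpa using hne
    rw [this]
    rfl

-- step: head token fresh — staged absorbs it into the ambient mapping
theorem pvStagedG_cons_fresh (p : String × String) (rest : List (String × String))
    (m : PySem.Dict String (Option String)) (hc : pvPH.contains p.2 = true)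
    (hg : m.get? (pvPH.getD p.2 "") = none) :
    pvStagedG (p :: rest) m = pvStagedG rest (m.insert (pvPH.getD p.2 "") (some p.1)) := by
  have hcont : m.contains (pvPH.getD p.2 "") = false := by
    rw [PySem.Dict.contains_eq_isSome_get?, hg]; rfl
  have hnkm : pvPH.getD p.2 "" ∉ m.keys := by
    rw [← PySem.Dict.get?_eq_none_iff_not_mem_keys]; exact hg
  set k0 := pvPH.getD p.2 "" with hk0
  set m' := m.insert k0 (some p.1) with hm'
  have hkeys' : m'.keys = m.keys ++ [k0] :=
    PySem.Dict.keys_insert_of_not_contains m _ hcont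
  by_cases hbad : rest.any (fun q => !pvPH.contains q.2) = true
  · rw [pvStagedG_invalid rest m' hbad]
    apply pvStagedG_invalid
    rw [List.any_cons, hbad, Bool.or_true]
  · rw [Bool.not_eq_true] at hbad
    unfold pvStagedG
    rw [List.any_cons, hc, hbad]
    simp only [Bool.not_true, Bool.false_or, if_neg Bool.false_ne_true]
    rw [List.any_cons]
    have hcl : (match m.get? (pvPH.getD p.2 "") with
        | some v => decide (v ≠ some p.1) | none => false) = false := by
      rw [hg]
    rw [hcl, Bool.false_or]
    by_cases hC : ∃ q ∈ rest, pvPH.getD q.2 "" = k0 ∧ q.1 ≠ p.1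
    · -- conflict in the tail: both sides fail
      obtain ⟨q, hq, hqk, hqv⟩ := hC
      have hRHS : rest.any (fun q => match m'.get? (pvPH.getD q.2 "") with
          | some v => decide (v ≠ some q.1) | none => false) = true := by
        rw [List.any_eq_true]
        refine ⟨q, hq, ?_⟩
        rw [hqk, hm', PySem.Dict.get?_insert_self]
        simpa using fun h => hqv h.symm
      rw [if_pos hRHS]
      split_ifs with hLHS
      · rfl
      · apply pvBuildB_none _ _ k0
        · simp [pvKeysG, hnkm, ← hk0]
        · have h1 : p.1 ∈ pvValsFor (p :: rest) k0 := by
            rw [pvValsFor_mem]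
            exact ⟨p, List.mem_cons_self .., hk0.symm, rfl⟩
          have h2 : q.1 ∈ pvValsFor (p :: rest) k0 := by
            rw [pvValsFor_mem]
            exact ⟨q, List.mem_cons_of_mem _ hq, hqk, rfl⟩
          have := pv_two_le_length h2 h1 hqv
          omega
    · -- no tail conflict: clauses agree and the fresh key's value list is [p.1]
      push_neg at hC
      have hany : rest.any (fun q => match m.get? (pvPH.getD q.2 "") with
            | some v => decide (v ≠ some q.1) | none => false) =
          rest.any (fun q => match m'.get? (pvPH.getD q.2 "") with
            | some v => decide (v ≠ some q.1) | none => false) := by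
        apply PySem.List.any_congr_mem
        intro q hq
        by_cases hqk : pvPH.getD q.2 "" = k0
        · rw [hqk, hg, hm', PySem.Dict.get?_insert_self]
          simp [hC q hq hqk]
        · rw [hm', PySem.Dict.get?_insert_of_ne m _ hqk]
      rw [← hany]
      split_ifs with h1
      · rfl
      · have hkeysL : pvKeysG (p :: rest) m.keys =
            k0 :: pvKeysG rest (m.keys ++ [k0]) := by
          simp [pvKeysG, hnkm, ← hk0]
        have hvals : pvValsFor (p :: rest) k0 = [p.1] := by
          unfold pvValsFor
          rw [List.foldl_cons, if_pos ⟨hk0.symm, List.not_mem_nil⟩, List.nil_append]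
          apply pvValsFor_stable
          intro q hq hqk
          rw [List.mem_singleton]
          exact hC q hq hqk
        rw [hkeysL, pvBuildB, hvals]
        simp only [List.length_cons, List.length_nil, ne_eq, not_true_eq_false, if_false,
          List.head?_cons]
        rw [← hkeys']
        apply pvBuildB_congr
        intro k hk
        apply pvValsFor_cons_ne
        intro he
        have hnm := pvKeysG_not_mem_seen rest m'.keys k hk
        rw [hkeys'] at hnm
        exact hnm (List.mem_append_right _ (by simp [he, hk0]))

-- the main invariant: A's loop from m computes B's staged pipeline with ambient m
theorem pvMain (pairs : List (String × String)) (m : PySem.Dict String (Option String)) :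
    pvALoop' pairs m = pvStagedG pairs m := by
  induction pairs generalizing m with
  | nil => rfl
  | cons p rest ih =>
    by_cases hv : p.2 ∈ (["{A}", "{B}", "{PLACE}", "{OBJECT}"] : List String)
    · have hc : pvPH.contains p.2 = true := (pvPH_contains_iff p.2).mpr hv
      have hkey : pvPH.getD p.2 "" = pvKey p.2 := pvPH_getD_eq_pvKey p.2 hv
      cases hg : m.get? (pvKey p.2) with
      | some v =>
        by_cases hne : v = some p.1
        · subst hne
          rw [pvStagedG_cons_seen p rest m hc (hkey ▸ hg), ← ih]
          simp [pvALoop', hv, hg]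
        · rw [pvStagedG_cons_conflict p rest m hc v (hkey ▸ hg) hne]
          simp [pvALoop', hv, hg, hne]
      | none =>
        rw [pvStagedG_cons_fresh p rest m hc (hkey ▸ hg), ← ih]
        simp [pvALoop', hv, hg, hkey]
    · have hc : pvPH.contains p.2 = false := by
        rw [← Bool.not_eq_true, pvPH_contains_iff]; exact hv
      rw [pvStagedG_cons_invalid p rest m hc]
      simp [pvALoop', hv]

-- staged pipeline from the empty mapping IS B's computation shape
theorem pvStagedG_empty (pairs : List (String × String)) :
    pvStagedG pairs PySem.Dict.empty =
      if pairs.any (fun p => !pvPH.contains p.2) then none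
      else pvBuildB pairs (pvKeysOf pairs []) PySem.Dict.empty := by
  unfold pvStagedG
  have hsecond : pairs.any (fun p => match PySem.Dict.empty.get? (pvPH.getD p.2 "") with
      | some v => decide (v ≠ some p.1) | none => false) = false := by
    rw [List.any_eq_false]
    intro p _
    rw [PySem.Dict.get?_empty]
    simp
  have hkeys : (PySem.Dict.empty : PySem.Dict String (Option String)).keys = [] :=
    PySem.Dict.keys_empty
  rw [hsecond, if_neg Bool.false_ne_true, hkeys, pvKeysOf_eq, List.nil_append]

-- ===== VERDICT (by name: the statement is the Claim_ definition above) =====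
theorem try_fit_template_spec : Claim_equal_try_fit_template := by
  intro string template _
  show try_fit_template string template = try_fit_template_alt string template
  unfold try_fit_template try_fit_template_alt
  rw [pvALoop_eq_ALoop', pvMain]
  rw [show List.map (fun p => pvStripPair p.1 p.2)
        (List.filter (fun p => decide (p.1 ≠ p.2)) (pvTokens string template)) =
      pvPairs string template from rfl]
  rw [pvStagedG_empty]
  by_cases hA : (pvPairs string template).any (fun p => !pvPH.contains p.2) = true
  · rw [if_pos hA, if_pos hA]
  · rw [if_neg hA, if_neg hA]
    cases pvBuildB (pvPairs string template)
        (pvKeysOf (pvPairs string template) []) PySem.Dict.empty <;> rfl
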